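-- pv_equiv track=rewrite | github.com/nuno887/SpaCy | clean_people_chunk.py | trim_after_keywords
-- ===== SOURCE A (Python) =====
-- def trim_after_keywords(text, keywords):
--     text_lower = text.lower()
--     cut_index = len(text)
--     for kw in keywords:
--         index = text_lower.find(kw.lower())
--         if index != -1 and index < cut_index:
--             cut_index = index
--     return text[:cut_index].strip()
-- ===== SOURCE B (Python) =====
-- def trim_after_keywords(text, keywords):
--     # Single left-to-right scan: stop at the first position where any
--     # (lowered) keyword matches, instead of running one full find per keyword.
--     text_lower = text.lower()
--     lowered = [kw.lower() for kw in keywords]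
--     for i in range(len(text_lower)):
--         if any(text_lower.startswith(kw, i) for kw in lowered):
--             return text[:i].strip()
--     return text.strip()
-- ===== Notes on version B (the rewrite author's own statement) =====
-- stated objective: faster
-- what changed: A runs a full str.find over the whole text for every keyword and keeps the minimum index; B lowers the keywords once and makes one left-to-right scan over the text that stops at the first position where any lowered keyword matches, so it never scans past the earliest match.
import Mathlib
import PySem

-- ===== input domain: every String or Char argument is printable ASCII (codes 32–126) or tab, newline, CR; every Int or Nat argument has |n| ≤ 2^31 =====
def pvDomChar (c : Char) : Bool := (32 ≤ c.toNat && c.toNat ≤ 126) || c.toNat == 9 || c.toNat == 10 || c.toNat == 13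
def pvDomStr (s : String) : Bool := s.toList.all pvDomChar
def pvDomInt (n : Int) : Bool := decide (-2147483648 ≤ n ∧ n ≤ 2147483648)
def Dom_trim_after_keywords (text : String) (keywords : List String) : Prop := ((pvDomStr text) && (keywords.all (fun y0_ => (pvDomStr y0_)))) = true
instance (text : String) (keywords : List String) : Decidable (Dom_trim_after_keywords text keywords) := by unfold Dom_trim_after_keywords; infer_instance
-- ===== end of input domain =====

-- B replaces A's per-keyword full `find` scans (minimised afterwards) by one left-to-right
-- scan over the text that stops at the first position where any lowered keyword matches
-- (measured faster in a timing run; same result, proved equal).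

-- ===== PORT A =====
-- loop body of A's `for kw in keywords` (cut_index update)
def pvStepA (text_lower : String) (cut : Int) (kw : String) : Int :=
  -- A's `index = text_lower.find(kw.lower())` inlined
  if PySem.Str.find text_lower (PySem.Str.lower kw) ≠ -1 ∧ PySem.Str.find text_lower (PySem.Str.lower kw) < cut
  then PySem.Str.find text_lower (PySem.Str.lower kw) else cut

def trim_after_keywords (text : String) (keywords : List String) : String :=
  let text_lower := PySem.Str.lower text
  let cut_index : Int := keywords.foldl (pvStepA text_lower) (PySem.Str.len text)
  PySem.Str.strip (PySem.Str.slice text none (some cut_index))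

-- ===== PORT B =====
-- Source B's `for i in range(len(text_lower))` with its early `return`, as structural recursion on i;
-- Python's `text_lower.startswith(kw, i)` is exact as `startswith (tl.drop i) kw` for 0 ≤ i,
-- and `text[:i]` with 0 ≤ i is exact as `text.take i`.
def pvAltLoop (text tl : List Char) (kws : List (List Char)) (i : Nat) : List Char :=
  if i < tl.length then
    if kws.any (fun kw => PySem.Chars.startswith (tl.drop i) kw) then
      PySem.Chars.strip (text.take i)
    else
      pvAltLoop text tl kws (i + 1)
  else
    PySem.Chars.strip text
termination_by tl.length - i

def trim_after_keywords_alt (text : String) (keywords : List String) : String :=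
  let tl := (PySem.Str.lower text).toList
  let lowered := keywords.map (fun kw => (PySem.Str.lower kw).toList)
  String.ofList (pvAltLoop text.toList tl lowered 0)

-- ===== PRECONDITION & SPEC =====
def Spec_trim_after_keywords (text : String) (keywords : List String) (out : String) : Prop := out = trim_after_keywords_alt text keywords
instance (text : String) (keywords : List String) (out : String) : Decidable (Spec_trim_after_keywords text keywords out) := by unfold Spec_trim_after_keywords; infer_instance

-- ===== CLAIM (what is proved, stated in full; the proofs are below) =====
def Claim_equal_trim_after_keywords : Prop := ∀ (text : String) (keywords : List String), Dom_trim_after_keywords text keywords → Spec_trim_after_keywords text keywords (trim_after_keywords text keywords)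

-- ===== LEMMAS AND PROOFS =====

-- characterisation of A's fold: the result is the initial value or a successful find,
-- it never grows, and it is a lower bound of every successful find
theorem pvFoldA_props (tl : String) (kws : List String) (c0 : Int) :
    (kws.foldl (pvStepA tl) c0 = c0 ∨
      ∃ kw ∈ kws, kws.foldl (pvStepA tl) c0 = PySem.Str.find tl (PySem.Str.lower kw) ∧
        PySem.Str.find tl (PySem.Str.lower kw) ≠ -1) ∧
    kws.foldl (pvStepA tl) c0 ≤ c0 ∧
    (∀ kw ∈ kws, PySem.Str.find tl (PySem.Str.lower kw) ≠ -1 →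
      kws.foldl (pvStepA tl) c0 ≤ PySem.Str.find tl (PySem.Str.lower kw)) := by
  induction kws generalizing c0 with
  | nil => simp
  | cons kw rest ih =>
    simp only [List.foldl_cons]
    obtain ⟨ih1, ih2, ih3⟩ := ih (pvStepA tl c0 kw)
    simp only [pvStepA] at *
    simp only [List.mem_cons]
    split_ifs at * with h
    · refine ⟨?_, ?_, ?_⟩
      · rcases ih1 with h1 | ⟨kw', hkw', h1, h2⟩
        · exact Or.inr ⟨kw, Or.inl rfl, h1, h.1⟩
        · exact Or.inr ⟨kw', Or.inr hkw', h1, h2⟩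
      · omega
      · rintro kw' (rfl | hkw') hne
        · omega
        · exact ih3 kw' hkw' hne
    · refine ⟨?_, ih2, ?_⟩
      · rcases ih1 with h1 | ⟨kw', hkw', h1, h2⟩
        · exact Or.inl h1
        · exact Or.inr ⟨kw', Or.inr hkw', h1, h2⟩
      · rintro kw' (rfl | hkw') hne
        · rw [not_and, not_lt] at h
          have := h hne
          omega
        · exact ih3 kw' hkw' hne

-- B's scan stops exactly at r, given that r is the first matching position (or the length)
theorem pvAltLoop_spec (text tl : List Char) (kws : List (List Char)) (r i : Nat)
    (hlen : text.length = tl.length) (hrL : r ≤ tl.length) (hil : i ≤ r)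
    (hP : r < tl.length → kws.any (fun kw => PySem.Chars.startswith (tl.drop r) kw) = true)
    (hno : ∀ j, j < r → kws.any (fun kw => PySem.Chars.startswith (tl.drop j) kw) = false) :
    pvAltLoop text tl kws i = PySem.Chars.strip (text.take r) := by
  induction hfuel : tl.length - i using Nat.strong_induction_on generalizing i with
  | _ fuel ih =>
  unfold pvAltLoop
  split_ifs with h1 h2
  · -- matched at i : i = r
    have : ¬ i < r := fun hlt => by simp [hno i hlt] at h2
    have : i = r := by omega
    rw [this]
  · -- no match at i : i < r, recurse
    have hir : i ≠ r := by
      rintro rfl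
      rw [hP h1] at h2
      exact h2 rfl
    exact ih (tl.length - (i + 1)) (by omega) (i + 1) (by omega) rfl
  · -- i = r = tl.length
    have : r = tl.length := by omega
    rw [this, ← hlen, List.take_length]

theorem trim_after_keywords_spec : Claim_equal_trim_after_keywords := by
  intro text keywords _
  unfold Spec_trim_after_keywords trim_after_keywords trim_after_keywords_alt
  simp only []
  set tl := PySem.Str.lower text with htl
  have hlenL : tl.toList.length = text.toList.length := by
    simp [htl, PySem.Str.lower, PySem.Chars.lower]
  set L : Int := (PySem.Str.len text) with hL
  have hLval : L = (text.toList.length : Int) := by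
    simp [hL, PySem.Str.len]
  set r0 : Int := keywords.foldl (pvStepA tl) L with hr0
  obtain ⟨h1, h2, h3⟩ := pvFoldA_props tl keywords L
  rw [← hr0] at h1 h2 h3
  have hfind_ge : ∀ kw : String, -1 ≤ PySem.Str.find tl (PySem.Str.lower kw) := by
    intro kw
    simpa using PySem.Chars.neg_one_le_find tl.toList (PySem.Str.lower kw).toList
  have hfind_le : ∀ kw : String, PySem.Str.find tl (PySem.Str.lower kw) ≤ (tl.toList.length : Int) := by
    intro kw
    simpa using PySem.Chars.find_le_length tl.toList (PySem.Str.lower kw).toList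
  have hr0_nonneg : 0 ≤ r0 := by
    rcases h1 with h | ⟨kw, _, heq, hne⟩
    · rw [h, hLval]; positivity
    · have := hfind_ge kw; omega
  have hr0_le : r0 ≤ (tl.toList.length : Int) := by rw [hLval] at h2; omega
  set r : Nat := r0.toNat with hr
  have hr0r : r0 = (r : Int) := by omega
  -- the first matching position is r
  have hP : r < tl.toList.length →
      (keywords.map (fun kw => (PySem.Str.lower kw).toList)).any
        (fun kw => PySem.Chars.startswith (tl.toList.drop r) kw) = true := by
    intro hrlt
    rcases h1 with h | ⟨kw, hmem, heq, hne⟩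
    · rw [hLval] at h; omega
    · have hpos : 0 ≤ PySem.Str.find tl (PySem.Str.lower kw) := by
        have := hfind_ge kw; omega
      have hfs := PySem.Chars.find_spec (s := tl.toList) (sub := (PySem.Str.lower kw).toList)
        (by simpa using hpos)
      have hfr : (PySem.Chars.find tl.toList (PySem.Str.lower kw).toList).toNat = r := by
        have : PySem.Chars.find tl.toList (PySem.Str.lower kw).toList = r0 := by
          simpa using heq.symm
        omega
      rw [hfr] at hfs
      rw [List.any_eq_true]
      refine ⟨(PySem.Str.lower kw).toList, List.mem_map_of_mem hmem, ?_⟩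
      exact (PySem.Chars.startswith_iff _ _).mpr hfs.1
  have hno : ∀ j, j < r →
      (keywords.map (fun kw => (PySem.Str.lower kw).toList)).any
        (fun kw => PySem.Chars.startswith (tl.toList.drop j) kw) = false := by
    intro j hj
    by_contra h
    rw [Bool.not_eq_false, List.any_eq_true] at h
    obtain ⟨kwl, hmem, hsw⟩ := h
    obtain ⟨kw, hkw, rfl⟩ := List.mem_map.mp hmem
    have hpre : (PySem.Str.lower kw).toList <+: tl.toList.drop j :=
      (PySem.Chars.startswith_iff _ _).mp hsw
    have hisin : PySem.Chars.isIn (PySem.Str.lower kw).toList tl.toList = true :=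
      (PySem.Chars.exists_prefix_drop_iff_isIn _ _).mp ⟨j, hpre⟩
    have hne : PySem.Str.find tl (PySem.Str.lower kw) ≠ -1 := by
      have := (PySem.Chars.find_ne_neg_one_iff tl.toList (PySem.Str.lower kw).toList).mpr
        ((PySem.Chars.isIn_iff_infix _ _).mp hisin)
      simpa using this
    have hpos : 0 ≤ PySem.Str.find tl (PySem.Str.lower kw) := by
      have := hfind_ge kw; omega
    have hfs := PySem.Chars.find_spec (s := tl.toList) (sub := (PySem.Str.lower kw).toList)
      (by simpa using hpos)
    have hjge : ¬ j < (PySem.Chars.find tl.toList (PySem.Str.lower kw).toList).toNat →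
        (PySem.Chars.find tl.toList (PySem.Str.lower kw).toList).toNat ≤ j := by omega
    have hmin : (PySem.Chars.find tl.toList (PySem.Str.lower kw).toList).toNat ≤ j := by
      by_contra hc
      exact hfs.2 j (by omega) hpre
    have hle := h3 kw hkw hne
    have hfind_eq : PySem.Chars.find tl.toList (PySem.Str.lower kw).toList
        = PySem.Str.find tl (PySem.Str.lower kw) := by simp
    omega
  have halt := pvAltLoop_spec text.toList tl.toList
      (keywords.map (fun kw => (PySem.Str.lower kw).toList)) r 0
      (by omega) (by omega) (Nat.zero_le r) hP hno
  -- both sides are strip (take r text)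
  apply String.toList_injective
  have hslice : PySem.Str.slice text none (some r0) = String.ofList (text.toList.take r) := by
    apply String.toList_injective
    simp [PySem.Str.slice, hr0r]
  rw [halt, hslice]
  simp [PySem.Str.strip]
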